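-- pv_equiv track=rewrite | github.com/MeneghelClaudio/Progetto_Proxmox | backend/app/tasks.py | _extract_error_from_log
-- ===== SOURCE A (Python) =====
-- _ERROR_KEYWORDS = ("error:", "task error", "can't", "cannot", "failed", "abort", "refused")
--
-- def _extract_error_from_log(lines: list[dict]) -> str | None:
--     """
--     Return the most meaningful error context from a Proxmox task log.
--
--     Strategy:
--       1. Collect all lines matching error keywords.
--       2. Remove the generic last-line summary ("TASK ERROR: migration aborted",
--          "TASK ERROR: job errors") — it is always present and not informative.
--       3. Return the remaining lines joined with newlines (most specific first).
--       4. If nothing remains, fall back to the last error line (generic summary).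
--     """
--     # Patterns that are the generic summary line — not useful on their own
--     _GENERIC = ("task error: migration aborted", "task error: job errors",
--                 "task error: command", "task ok")
--
--     all_error: list[str] = []
--     for entry in lines:
--         text = (entry.get("t") or entry.get("text") or "").strip()
--         if not text:
--             continue
--         tl = text.lower()
--         if any(kw in tl for kw in _ERROR_KEYWORDS):
--             all_error.append(text)
--
--     if not all_error:
--         return None
--
--     # Filter out generic summary lines
--     specific = [t for t in all_error if not any(g in t.lower() for g in _GENERIC)]
--     chosen   = specific if specific else all_error
--
--     # Return the last few most relevant lines (avoid huge messages)
--     return "\n".join(chosen[-5:]) if chosen else None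
-- ===== SOURCE B (Python) =====
-- _ERROR_KEYWORDS = ("error:", "task error", "can't", "cannot", "failed", "abort", "refused")
--
-- def _extract_error_from_log(lines: list[dict]) -> str | None:
--     """Single streaming pass with O(1) memory: keep only the last 5 error
--     lines and the last 5 *specific* (non-generic) error lines."""
--     _GENERIC = ("task error: migration aborted", "task error: job errors",
--                 "task error: command", "task ok")
--
--     err_tail: list[str] = []    # last <= 5 error lines seen so far
--     spec_tail: list[str] = []   # last <= 5 specific error lines seen so far
--     have_error = False
--     for entry in lines:
--         text = (entry.get("t") or entry.get("text") or "").strip()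
--         if not text:
--             continue
--         tl = text.lower()
--         if any(kw in tl for kw in _ERROR_KEYWORDS):
--             have_error = True
--             err_tail.append(text)
--             if len(err_tail) > 5:
--                 err_tail.pop(0)
--             if not any(g in tl for g in _GENERIC):
--                 spec_tail.append(text)
--                 if len(spec_tail) > 5:
--                     spec_tail.pop(0)
--     if not have_error:
--         return None
--     return "\n".join(spec_tail if spec_tail else err_tail)
-- ===== Notes on version B (the rewrite author's own statement) =====
-- stated objective: alternative
-- what changed: Replaces collect-all-then-filter-then-slice with one streaming pass that maintains two bounded (length <= 5) tail buffers, one for all error lines and one for specific ones, so no full error list is ever built or re-scanned.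
import Mathlib
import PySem

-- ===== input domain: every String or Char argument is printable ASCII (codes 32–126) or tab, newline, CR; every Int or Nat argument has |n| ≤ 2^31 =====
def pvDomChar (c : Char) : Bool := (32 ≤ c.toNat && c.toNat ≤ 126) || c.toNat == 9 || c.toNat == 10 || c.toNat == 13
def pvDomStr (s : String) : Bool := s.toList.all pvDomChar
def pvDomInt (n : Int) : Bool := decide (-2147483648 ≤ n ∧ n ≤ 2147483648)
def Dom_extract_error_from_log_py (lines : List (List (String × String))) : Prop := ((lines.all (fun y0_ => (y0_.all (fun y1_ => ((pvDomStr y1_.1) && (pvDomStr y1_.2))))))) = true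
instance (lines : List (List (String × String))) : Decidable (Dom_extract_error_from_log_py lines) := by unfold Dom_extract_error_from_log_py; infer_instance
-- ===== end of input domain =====

-- B changes the structure only: one streaming pass keeping two bounded (≤5) tail buffers
-- instead of collecting all error lines, filtering them, and slicing the last 5.

-- shared literal data (module constants of the Python file)
def pvKeywords : List String := ["error:", "task error", "can't", "cannot", "failed", "abort", "refused"]
def pvGeneric : List String := ["task error: migration aborted", "task error: job errors", "task error: command", "task ok"]
-- (x or y) on strings/None: first truthy value
def pvOr (o : Option String) (b : String) : String :=
  match o with
  | some s => if s == "" then b else s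
  | none => b
-- (entry.get("t") or entry.get("text") or "").strip()
def pvText (entry : List (String × String)) : String :=
  PySem.Str.strip (pvOr (PySem.Dict.get? (PySem.Dict.mk entry) "t")
    (pvOr (PySem.Dict.get? (PySem.Dict.mk entry) "text") ""))

-- ===== PORT A =====
-- loop body of A's first pass
def pvStepA (acc : List String) (entry : List (String × String)) : List String :=
  let text := pvText entry
  if text == "" then acc
  else
    let tl := PySem.Str.lower text
    if pvKeywords.any (fun kw => PySem.Str.isIn kw tl) then acc ++ [text] else acc

def extract_error_from_log_py (lines : List (List (String × String))) : Option String :=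
  let all_error := lines.foldl pvStepA []
  if all_error.isEmpty then none
  else
    let specific := all_error.filter (fun t => ! pvGeneric.any (fun g => PySem.Str.isIn g (PySem.Str.lower t)))
    let chosen := if specific.isEmpty then all_error else specific
    if chosen.isEmpty then none
    else some (PySem.Str.join "\n" (PySem.List.slice chosen (some (-5)) none))

-- ===== PORT B =====
-- xs.append(t); if len(xs) > 5: xs.pop(0)
def pvPush5 (xs : List String) (t : String) : List String :=
  if 5 < (xs ++ [t]).length then (xs ++ [t]).drop 1 else xs ++ [t]

-- loop body of B's single pass: (err_tail, spec_tail, have_error)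
def pvStepB (st : List String × List String × Bool) (entry : List (String × String)) :
    List String × List String × Bool :=
  let text := pvText entry
  if text == "" then st
  else
    let tl := PySem.Str.lower text
    if pvKeywords.any (fun kw => PySem.Str.isIn kw tl) then
      (pvPush5 st.1 text,
       (if pvGeneric.any (fun g => PySem.Str.isIn g tl) then st.2.1 else pvPush5 st.2.1 text),
       true)
    else st

def extract_error_from_log_py_alt (lines : List (List (String × String))) : Option String :=
  let st := lines.foldl pvStepB ([], [], false)
  if st.2.2 then
    some (PySem.Str.join "\n" (if st.2.1.isEmpty then st.1 else st.2.1))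
  else none

-- ===== PRECONDITION & SPEC =====
def Spec_extract_error_from_log_py (lines : List (List (String × String))) (out : Option String) : Prop := out = extract_error_from_log_py_alt lines
instance (lines : List (List (String × String))) (out : Option String) : Decidable (Spec_extract_error_from_log_py lines out) := by unfold Spec_extract_error_from_log_py; infer_instance

-- ===== CLAIM (what is proved, stated in full; the proofs are below) =====
def Claim_equal_extract_error_from_log_py : Prop := ∀ (lines : List (List (String × String))), Dom_extract_error_from_log_py lines → Spec_extract_error_from_log_py lines (extract_error_from_log_py lines)

-- ===== LEMMAS AND PROOFS =====

-- the error line (if any) contributed by one entry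
def pvErr? (entry : List (String × String)) : Option String :=
  let text := pvText entry
  if text == "" then none
  else if pvKeywords.any (fun kw => PySem.Str.isIn kw (PySem.Str.lower text)) then some text else none

def pvErrs (lines : List (List (String × String))) : List String := lines.filterMap pvErr?

-- "is a generic summary line"
def pvIsGen (t : String) : Bool := pvGeneric.any (fun g => PySem.Str.isIn g (PySem.Str.lower t))

def pvLast5 (xs : List String) : List String := xs.drop (xs.length - 5)

theorem stepA_eq (acc : List String) (e : List (String × String)) :
    pvStepA acc e = acc ++ (pvErr? e).toList := by
  simp only [pvStepA, pvErr?]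
  split_ifs <;> simp

theorem foldA_eq (lines : List (List (String × String))) (acc : List String) :
    lines.foldl pvStepA acc = acc ++ pvErrs lines := by
  induction lines generalizing acc with
  | nil => simp [pvErrs]
  | cons e rest ih => simp [pvErrs, List.filterMap_cons, ih, stepA_eq]
                      cases pvErr? e <;> simp [pvErrs]

theorem stepB_eq (st : List String × List String × Bool) (e : List (String × String)) :
    pvStepB st e = match pvErr? e with
      | none => st
      | some t => (pvPush5 st.1 t, (if pvIsGen t then st.2.1 else pvPush5 st.2.1 t), true) := by
  unfold pvStepB pvErr? pvIsGen
  by_cases h1 : (pvText e == "") = true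
  · rw [if_pos h1, if_pos h1]
  · rw [if_neg h1, if_neg h1]
    by_cases h2 : (pvKeywords.any fun kw => PySem.Str.isIn kw (PySem.Str.lower (pvText e))) = true
    · rw [if_pos h2, if_pos h2]
    · rw [if_neg h2, if_neg h2]

theorem push5_last5 (xs : List String) (t : String) :
    pvPush5 (pvLast5 xs) t = pvLast5 (xs ++ [t]) := by
  unfold pvPush5 pvLast5
  by_cases h : xs.length < 5
  · have h0 : xs.length - 5 = 0 := by omega
    have h1 : (xs ++ [t]).length - 5 = 0 := by simp; omega
    rw [h0, h1, List.drop_zero, List.drop_zero, if_neg (by simp; omega)]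
  · have h0 : (xs.drop (xs.length - 5)).length = 5 := by simp; omega
    rw [if_pos (by simp [h0])]
    rw [List.drop_append_of_le_length (by rw [h0]; omega)]
    rw [List.drop_append_of_le_length (by simp)]
    rw [List.drop_drop]
    congr 2
    simp
    omega


theorem foldB_eq (lines : List (List (String × String))) (E S : List String) (b : Bool) :
    lines.foldl pvStepB (pvLast5 E, pvLast5 S, b) =
      (pvLast5 (E ++ pvErrs lines),
       pvLast5 (S ++ (pvErrs lines).filter (fun t => ! pvIsGen t)),
       b || ! (pvErrs lines).isEmpty) := by
  induction lines generalizing E S b with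
  | nil => simp [pvErrs]
  | cons e rest ih =>
    have herrs : pvErrs (e :: rest) = (pvErr? e).toList ++ pvErrs rest := by
      simp [pvErrs, List.filterMap_cons]; cases pvErr? e <;> simp
    rw [List.foldl_cons, stepB_eq]
    cases ht : pvErr? e with
    | none => simp only [herrs, ht, Option.toList_none, List.nil_append]; exact ih E S b
    | some t =>
      simp only
      by_cases hg : pvIsGen t
      · rw [if_pos hg, push5_last5, ih (E ++ [t]) S true]
        simp [herrs, ht, hg, List.append_assoc]
      · rw [if_neg hg, push5_last5, push5_last5, ih (E ++ [t]) (S ++ [t]) true]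
        simp [herrs, ht, hg, List.append_assoc]

theorem last5_eq_nil_iff (xs : List String) : pvLast5 xs = [] ↔ xs = [] := by
  simp only [pvLast5, ← List.length_eq_zero_iff, List.length_drop]
  omega

theorem slice_neg5 (xs : List String) :
    PySem.List.slice xs (some (-5)) none = pvLast5 xs := by
  rw [PySem.List.slice_from_neg_ofNat xs 5 (by omega)]
  rfl

-- ===== VERDICT (by name: the statement is the Claim_ definition above) =====
theorem extract_error_from_log_py_spec : Claim_equal_extract_error_from_log_py := by
  intro lines _
  unfold Spec_extract_error_from_log_py extract_error_from_log_py extract_error_from_log_py_alt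
  have hA := foldA_eq lines []
  simp only [List.nil_append] at hA
  have hnil : pvLast5 ([] : List String) = [] := rfl
  have hB := foldB_eq lines [] [] false
  rw [hnil] at hB
  simp only [List.nil_append, Bool.false_or] at hB
  rw [hA, hB]
  simp only [slice_neg5]
  have hpred : (fun t => ! pvGeneric.any (fun g => PySem.Str.isIn g (PySem.Str.lower t)))
      = (fun t => ! pvIsGen t) := by funext t; simp [pvIsGen]
  rw [hpred]
  by_cases hEnil : pvErrs lines = []
  · simp [hEnil]
  · by_cases hSnil : (pvErrs lines).filter (fun t => ! pvIsGen t) = []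
    · simp [hEnil, hSnil, pvLast5]
    · have h1 : pvLast5 ((pvErrs lines).filter (fun t => ! pvIsGen t)) ≠ [] :=
        fun h => hSnil ((last5_eq_nil_iff _).mp h)
      simp [hEnil, hSnil, h1]
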